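-- pv_equiv track=rewrite | github.com/jprice8/interview-prep | sliding-window/itemsInContainers.py | itemsInContainers
-- ===== SOURCE A (Python) =====
-- from typing import List
--
-- def itemsInContainers(s: str, startIndices: List[int], endIndices: List[int]) -> List[int]:
--     # handle edge case
--     if len(s) < 2:
--         return [0]
--
--     # instantiate variables
--     result = []
--
--     # find idx of first pipe
--     leftMostPipeIdx = -1
--     for idx, char in enumerate(s):
--         if char == '|':
--             leftMostPipeIdx = idx
--             break
--
--     # find idx of last pipe
--     rightMostPipeIdx = -1
--     for idx in reversed(range(len(s))):
--         char = s[idx]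
--         if char == '|':
--             rightMostPipeIdx = idx
--             break
--
--     # handle no pipe pairs in string
--     if leftMostPipeIdx == -1 or rightMostPipeIdx == -1:
--         return [0]
--
--     # loop through index pairs
--     for i in range(len(startIndices)):
--         # convert to zero indexed
--         startIdx = startIndices[i] - 1
--         endIdx = endIndices[i] - 1
--
--         # find max of startIdx or left most pipe
--         trueStartIdx = max(startIdx, leftMostPipeIdx)
--         trueEndIdx = min(endIdx, rightMostPipeIdx)
--         # loop through true range and count stars
--         starCount = 0
--         for charIdx in range(trueStartIdx, trueEndIdx + 1):
--             char = s[charIdx]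
--             if char == '*':
--                 starCount += 1
--
--         if starCount > 0:
--             result.append(starCount)
--
--     return result
-- ===== SOURCE B (Python) =====
-- from typing import List
--
-- def itemsInContainers(s: str, startIndices: List[int], endIndices: List[int]) -> List[int]:
--     # same edge cases as the task: too-short string or no pipe at all
--     if len(s) < 2:
--         return [0]
--     left = s.find('|')
--     if left == -1:
--         return [0]
--     right = len(s) - 1 - s[::-1].find('|')
--
--     # prefix sums of star counts: prefix[k] = number of '*' in s[:k]
--     prefix = [0]
--     run = 0
--     for ch in s:
--         if ch == '*':
--             run += 1
--         prefix.append(run)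
--
--     result = []
--     for a, b in zip(startIndices, endIndices):
--         lo = max(a - 1, left)
--         hi = min(b - 1, right)
--         if lo <= hi:
--             c = prefix[hi + 1] - prefix[lo]
--             if c > 0:
--                 result.append(c)
--     return result
-- ===== Notes on version B (the rewrite author's own statement) =====
-- stated objective: faster
-- what changed: Replaces the per-query linear scan over the string with a prefix-sum array of star counts built once, answering each clamped query in O(1), and uses find/rfind plus zip instead of hand-rolled index loops.
import Mathlib
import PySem

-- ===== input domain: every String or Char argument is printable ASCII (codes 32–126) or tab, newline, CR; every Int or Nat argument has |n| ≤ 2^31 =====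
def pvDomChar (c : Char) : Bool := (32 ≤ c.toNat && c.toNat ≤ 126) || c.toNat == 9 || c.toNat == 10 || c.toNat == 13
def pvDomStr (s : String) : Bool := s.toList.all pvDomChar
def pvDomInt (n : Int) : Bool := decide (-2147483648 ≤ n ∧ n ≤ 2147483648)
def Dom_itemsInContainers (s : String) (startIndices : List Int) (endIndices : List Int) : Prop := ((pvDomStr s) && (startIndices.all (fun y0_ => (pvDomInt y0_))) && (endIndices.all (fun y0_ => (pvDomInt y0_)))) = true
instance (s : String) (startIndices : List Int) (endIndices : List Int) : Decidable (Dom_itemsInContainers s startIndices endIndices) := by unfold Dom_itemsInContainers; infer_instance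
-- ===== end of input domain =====

-- B replaces A's per-query linear scan of the string by a prefix-sum list of star counts
-- (built once; each clamped query answered by one subtraction); return values proved equal on Pre_.

-- ===== PORT A =====
-- 'for idx, char in enumerate(s): if char == '|': leftMostPipeIdx = idx; break'
def pvFindLeftA : List Char → Nat → Int
  | [], _ => -1
  | c :: t, idx => if c == '|' then (idx : Int) else pvFindLeftA t (idx + 1)

-- 'for idx in reversed(range(len(s))): if s[idx] == '|': rightMostPipeIdx = idx; break'
-- (the reversed range is the explicit list argument; every idx in it is in range, so pyGetD is exact)
def pvFindRightA (cs : List Char) : List Int → Int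
  | [] => -1
  | i :: rest => if PySem.List.pyGetD cs i ' ' == '|' then i else pvFindRightA cs rest

-- the body of A's query loop: clamp the pair, scan the clamped range counting stars, append if > 0
def pvQueryBodyA (cs : List Char) (L R : Int) (result : List Int) (x y : Int) : List Int :=
  let startIdx := x - 1
  let endIdx := y - 1
  let trueStartIdx := max startIdx L
  let trueEndIdx := min endIdx R
  let starCount := (PySem.List.pyRange trueStartIdx (trueEndIdx + 1) 1).foldl
    (fun acc charIdx => if PySem.List.pyGetD cs charIdx ' ' == '*' then acc + 1 else acc) (0 : Int)
  if starCount > 0 then result ++ [starCount] else result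

def itemsInContainers (s : String) (startIndices : List Int) (endIndices : List Int) : List Int :=
  let cs := s.toList
  if cs.length < 2 then [0]
  else
    let leftMostPipeIdx := pvFindLeftA cs 0
    let rightMostPipeIdx := pvFindRightA cs (PySem.List.pyRange ((cs.length : Int) - 1) (-1) (-1))
    if leftMostPipeIdx == -1 || rightMostPipeIdx == -1 then [0]
    else
      -- startIndices[i] is always in range; endIndices[i] raises IndexError in Python when
      -- i ≥ len(endIndices) — exactly those inputs are excluded by Pre_, so pyGetD is exact here
      (PySem.List.pyRange 0 (startIndices.length : Int) 1).foldl (fun result i =>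
        pvQueryBodyA cs leftMostPipeIdx rightMostPipeIdx result
          (PySem.List.pyGetD startIndices i 0) (PySem.List.pyGetD endIndices i 0)) []

-- ===== PORT B =====
-- 'run = 0; for ch in s: run += (ch == '*'); prefix.append(run)' — the tail of the prefix list
def pvBuildPrefix : List Char → Int → List Int
  | [], _ => []
  | c :: t, run =>
    let run' := run + (if c == '*' then 1 else 0)
    run' :: pvBuildPrefix t run'

-- the body of B's query loop: clamp the pair and answer from the prefix sums
def pvQueryBodyB (L R : Int) (pref : List Int) (result : List Int) (x y : Int) : List Int :=
  let lo := max (x - 1) L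
  let hi := min (y - 1) R
  if lo ≤ hi then
    -- pref[hi+1], pref[lo]: both indices are nonnegative and in range here, so getD is exact
    let c := pref.getD (hi + 1).toNat 0 - pref.getD lo.toNat 0
    if c > 0 then result ++ [c] else result
  else result

def itemsInContainers_alt (s : String) (startIndices : List Int) (endIndices : List Int) : List Int :=
  let cs := s.toList
  if cs.length < 2 then [0]
  else
    let left := PySem.Chars.find cs ['|']                      -- s.find('|')
    if left == -1 then [0]
    else
      -- s[::-1] is the reverse of s (PySem.List.slice?_none_none_neg_one)
      let right := (cs.length : Int) - 1 - PySem.Chars.find cs.reverse ['|']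
      let pref := (0 : Int) :: pvBuildPrefix cs 0
      (startIndices.zip endIndices).foldl
        (fun result p => pvQueryBodyB left right pref result p.1 p.2) []

-- ===== PRECONDITION & SPEC =====
-- Pre_ excludes exactly the inputs where Python A raises IndexError (endIndices[i] with
-- i ≥ len(endIndices)): the query loop is only reached when len(s) ≥ 2 and s contains a pipe.
def Pre_itemsInContainers (s : String) (startIndices : List Int) (endIndices : List Int) : Prop :=
  startIndices.length ≤ endIndices.length ∨ s.toList.length < 2 ∨ '|' ∉ s.toList
instance (s : String) (startIndices : List Int) (endIndices : List Int) : Decidable (Pre_itemsInContainers s startIndices endIndices) := by unfold Pre_itemsInContainers; infer_instance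

def pvWitness_itemsInContainers : String × List Int × List Int := ("|**|a", [1, 2], [5, 3])

def Spec_itemsInContainers (s : String) (startIndices : List Int) (endIndices : List Int) (out : List Int) : Prop := out = itemsInContainers_alt s startIndices endIndices
instance (s : String) (startIndices : List Int) (endIndices : List Int) (out : List Int) : Decidable (Spec_itemsInContainers s startIndices endIndices out) := by unfold Spec_itemsInContainers; infer_instance

-- ===== CLAIM (what is proved, stated in full; the proofs are below) =====
def Claim_equal_itemsInContainers : Prop := ∀ (s : String) (startIndices : List Int) (endIndices : List Int), Dom_itemsInContainers s startIndices endIndices → Pre_itemsInContainers s startIndices endIndices → Spec_itemsInContainers s startIndices endIndices (itemsInContainers s startIndices endIndices)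

-- ===== LEMMAS AND PROOFS =====

-- A's left-to-right pipe scan is exactly PySem's substring search for "|"
theorem findLeftA_eq_go (cs : List Char) : ∀ k : Nat, pvFindLeftA cs k = PySem.Chars.find.go ['|'] cs k := by
  induction cs with
  | nil => intro k; simp [pvFindLeftA, PySem.Chars.find.go]
  | cons c t ih =>
    intro k
    have hc' : ('|' = c) = (c = '|') := by simp [eq_comm]
    by_cases hc : c = '|'
    · simp [pvFindLeftA, PySem.Chars.find.go, hc, List.isPrefixOf]
    · simp [pvFindLeftA, PySem.Chars.find.go, hc', hc, List.isPrefixOf, ih]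

-- shifting the starting offset of find.go when the needle occurs
theorem findgo_shift (cs : List Char) (h : '|' ∈ cs) :
    ∀ k : Nat, PySem.Chars.find.go ['|'] cs (k + 1) = PySem.Chars.find.go ['|'] cs k + 1 := by
  induction cs with
  | nil => simp at h
  | cons c t ih =>
    intro k
    have hc' : ('|' = c) = (c = '|') := by simp [eq_comm]
    by_cases hc : c = '|'
    · simp [PySem.Chars.find.go, hc, List.isPrefixOf]
    · have ht : '|' ∈ t := by
        rcases List.mem_cons.mp h with h1 | h1
        · exact absurd h1.symm hc
        · exact h1
      simp [PySem.Chars.find.go, hc', hc, List.isPrefixOf, ih ht]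

-- find.go either fails or returns an index between its offset and offset + length
theorem findgo_bounds (cs : List Char) :
    ∀ k : Nat, PySem.Chars.find.go ['|'] cs k = -1 ∨
      ((k : Int) ≤ PySem.Chars.find.go ['|'] cs k ∧
        PySem.Chars.find.go ['|'] cs k < (k : Int) + cs.length) := by
  induction cs with
  | nil => intro k; left; simp [PySem.Chars.find.go]
  | cons c t ih =>
    intro k
    have hc' : ('|' = c) = (c = '|') := by simp [eq_comm]
    by_cases hc : c = '|'
    · right
      simp [PySem.Chars.find.go, hc, List.isPrefixOf]
    · rcases ih (k + 1) with h | h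
      · left; simp [PySem.Chars.find.go, hc', hc, List.isPrefixOf, h]
      · right
        have hgo : PySem.Chars.find.go ['|'] (c :: t) k = PySem.Chars.find.go ['|'] t (k + 1) := by
          simp [PySem.Chars.find.go, List.isPrefixOf, hc', hc]
        rw [hgo]
        simp only [List.length_cons]
        push_cast at h ⊢
        omega

-- appending further characters does not change the scan over in-range indices
theorem findRightA_append (ds : List Char) (c : Char) :
    ∀ l : List Int, (∀ i ∈ l, 0 ≤ i ∧ i < (ds.length : Int)) →
      pvFindRightA (ds ++ [c]) l = pvFindRightA ds l := by
  intro l hl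
  induction l with
  | nil => rfl
  | cons i rest ih =>
    have hi := hl i (by simp)
    have hget : PySem.List.pyGetD (ds ++ [c]) i ' ' = PySem.List.pyGetD ds i ' ' := by
      rw [PySem.List.pyGetD_of_nonneg _ _ hi.1, PySem.List.pyGetD_of_nonneg _ _ hi.1]
      simp [List.getD, List.getElem?_append_left (show i.toNat < ds.length by omega)]
    simp only [pvFindRightA, hget]
    split
    · rfl
    · exact ih (fun j hj => hl j (List.mem_cons_of_mem _ hj))

-- A's right-to-left pipe scan equals len - 1 - find(reversed) when a pipe is present
theorem findRightA_eq (cs : List Char) (h : '|' ∈ cs) :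
    pvFindRightA cs (PySem.List.pyRange ((cs.length : Int) - 1) (-1) (-1))
      = (cs.length : Int) - 1 - PySem.Chars.find cs.reverse ['|'] := by
  induction cs using List.reverseRecOn with
  | nil => simp at h
  | append_singleton ds c ih =>
    have hlen : ((ds ++ [c]).length : Int) = (ds.length : Int) + 1 := by simp
    rw [hlen]
    have hcons : PySem.List.pyRange ((ds.length : Int) + 1 - 1) (-1) (-1)
        = (ds.length : Int) :: PySem.List.pyRange ((ds.length : Int) - 1) (-1) (-1) := by
      have := PySem.List.pyRange_neg_one_cons (a := (ds.length : Int)) (b := -1) (by omega)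
      simpa using this
    have hget : PySem.List.pyGetD (ds ++ [c]) (ds.length : Int) ' ' = c := by
      rw [PySem.List.pyGetD_natCast]
      simp [List.getD]
    have hc' : ('|' = c) = (c = '|') := by simp [eq_comm]
    by_cases hc : c = '|'
    · simp only [show (ds.length:Int) + 1 - 1 = (ds.length:Int) - 1 + 1 by ring] at *
      rw [hcons]
      simp only [pvFindRightA, hc]
      rw [PySem.Chars.find]
      simp [PySem.Chars.find.go, List.isPrefixOf]
    · have hd : '|' ∈ ds := by
        rcases List.mem_append.mp h with h1 | h1
        · exact h1
        · simp at h1; exact absurd h1.symm hc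
      rw [hcons]
      simp only [pvFindRightA, hget]
      rw [if_neg (by simp [hc])]
      rw [findRightA_append ds c _ (by
        intro i hi
        have := (PySem.List.mem_pyRange_neg_one).mp hi
        omega)]
      rw [ih hd]
      have : PySem.Chars.find (ds ++ [c]).reverse ['|'] = PySem.Chars.find ds.reverse ['|'] + 1 := by
        rw [List.reverse_append]
        simp only [List.reverse_singleton, List.singleton_append]
        rw [PySem.Chars.find, PySem.Chars.find]
        have hstep : PySem.Chars.find.go ['|'] (c :: ds.reverse) 0
            = PySem.Chars.find.go ['|'] ds.reverse 1 := by
          simp [PySem.Chars.find.go, List.isPrefixOf, hc', hc]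
        rw [hstep]
        exact findgo_shift ds.reverse (by simpa using hd) 0
      rw [this]
      ring

-- the prefix list of B holds running star counts
theorem buildPrefix_getD (cs : List Char) :
    ∀ (run : Int) (n : Nat), n ≤ cs.length →
      (run :: pvBuildPrefix cs run).getD n 0 = run + ((cs.take n).count '*' : Int) := by
  induction cs with
  | nil => intro run n hn; simp at hn; subst hn; simp
  | cons c t ih =>
    intro run n hn
    cases n with
    | zero => simp
    | succ k =>
      simp only [pvBuildPrefix, List.getD_cons_succ, List.take_succ_cons, List.count_cons]
      rw [ih _ k (by simpa using hn)]
      by_cases hc : c = '*' <;> simp [hc] <;> push_cast <;> ring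

-- A's inner counting loop counts the stars of the clamped slice
theorem countA_aux (cs : List Char) :
    ∀ (n : Nat) (a b init : Int), (b - a).toNat ≤ n → 0 ≤ a → b ≤ (cs.length : Int) →
      (PySem.List.pyRange a b 1).foldl
          (fun acc charIdx => if PySem.List.pyGetD cs charIdx ' ' == '*' then acc + 1 else acc) init
        = init + ((((cs.take b.toNat).drop a.toNat).count '*' : Nat) : Int) := by
  intro n
  induction n with
  | zero =>
    intro a b init hn ha hb
    have hba : b ≤ a := by omega
    rw [PySem.List.pyRange_one_eq_nil hba]
    have : (cs.take b.toNat).drop a.toNat = [] := by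
      rw [List.drop_eq_nil_iff]
      simp [List.length_take]
      omega
    simp [this]
  | succ n ih =>
    intro a b init hn ha hb
    by_cases hba : b ≤ a
    · rw [PySem.List.pyRange_one_eq_nil hba]
      have : (cs.take b.toNat).drop a.toNat = [] := by
        rw [List.drop_eq_nil_iff]
        simp [List.length_take]
        omega
      simp [this]
    · have hab : a < b := by omega
      rw [PySem.List.pyRange_one_cons hab]
      simp only [List.foldl_cons]
      rw [ih (a + 1) b _ (by omega) (by omega) hb]
      have halen : a.toNat < cs.length := by omega
      have hat : a.toNat < (cs.take b.toNat).length := by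
        simp [List.length_take]; omega
      have hdrop : (cs.take b.toNat).drop a.toNat
          = (cs.take b.toNat)[a.toNat] :: (cs.take b.toNat).drop (a.toNat + 1) :=
        List.drop_eq_getElem_cons hat
      have hgetelem : (cs.take b.toNat)[a.toNat]'hat = cs[a.toNat]'halen := by
        simp [List.getElem_take]
      have hget : PySem.List.pyGetD cs a ' ' = cs[a.toNat]'halen := by
        rw [PySem.List.pyGetD_of_nonneg _ _ ha]
        simp [List.getD, List.getElem?_eq_getElem halen]
      have h1 : (a + 1).toNat = a.toNat + 1 := by omega
      rw [h1, hdrop] at *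
      rw [List.count_cons]
      rw [hget, hgetelem]
      by_cases hc : cs[a.toNat]'halen = '*' <;> simp [hc] <;> push_cast <;> ring

-- A's index-driven query loop is B's zip-driven query loop (for pointwise-equal bodies)
theorem pyRangeFold_zip (g : List Int → Int → Int → List Int) :
    ∀ (st en : List Int) (acc : List Int), st.length ≤ en.length →
      (PySem.List.pyRange 0 (st.length : Int) 1).foldl
          (fun r i => g r (PySem.List.pyGetD st i 0) (PySem.List.pyGetD en i 0)) acc
        = (st.zip en).foldl (fun r p => g r p.1 p.2) acc := by
  intro st
  induction st with
  | nil => intro en acc h; simp [PySem.List.pyRange_one_eq_nil]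
  | cons a st' ih =>
    intro en acc h
    cases en with
    | nil => simp at h
    | cons b en' =>
      have hcons : PySem.List.pyRange 0 ((a :: st').length : Int) 1
          = 0 :: PySem.List.pyRange 1 ((a :: st').length : Int) 1 :=
        PySem.List.pyRange_one_cons (by simp)
      rw [hcons]
      simp only [List.foldl_cons]
      have hshift : PySem.List.pyRange 1 ((a :: st').length : Int) 1
          = (PySem.List.pyRange 0 (st'.length : Int) 1).map (· + 1) := by
        rw [PySem.List.pyRange_one, PySem.List.pyRange_one, List.map_map]
        have hok : (((a :: st').length : Int) - 1).toNat = ((st'.length : Int) - 0).toNat := by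
          simp
        rw [hok]
        apply List.map_congr_left
        intro k _
        simp
        ring
      have hget0s : PySem.List.pyGetD (a :: st') (0 : Int) 0 = a := by
        rw [PySem.List.pyGetD_of_nonneg _ _ (le_refl 0)]; simp
      have hget0e : PySem.List.pyGetD (b :: en') (0 : Int) 0 = b := by
        rw [PySem.List.pyGetD_of_nonneg _ _ (le_refl 0)]; simp
      rw [hget0s, hget0e, hshift, List.foldl_map]
      have hbody : ∀ (r : List Int) (i : Int), i ∈ PySem.List.pyRange 0 (st'.length : Int) 1 →
          g r (PySem.List.pyGetD (a :: st') (i + 1) 0) (PySem.List.pyGetD (b :: en') (i + 1) 0)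
            = g r (PySem.List.pyGetD st' i 0) (PySem.List.pyGetD en' i 0) := by
        intro r i hi
        have hi' := PySem.List.mem_pyRange_one.mp hi
        have h1 : (i + 1) = ((i.toNat + 1 : Nat) : Int) := by omega
        have h2 : i = ((i.toNat : Nat) : Int) := by omega
        rw [h1, PySem.List.pyGetD_natCast, PySem.List.pyGetD_natCast, h2,
          PySem.List.pyGetD_natCast, PySem.List.pyGetD_natCast]
        simp
        rw [show (max i 0).toNat = i.toNat from by omega]
      rw [PySem.List.foldl_congr_mem _ _ _ _ (fun r i hi => hbody r i hi)]
      exact ih en' _ (by simpa using h)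

-- the two loop bodies agree whenever the pipe bounds are genuine indices of cs
theorem queryBody_eq (cs : List Char) (L R : Int)
    (hL0 : 0 ≤ L) (hR : R < (cs.length : Int)) :
    ∀ (r : List Int) (x y : Int),
      pvQueryBodyA cs L R r x y
        = pvQueryBodyB L R ((0 : Int) :: pvBuildPrefix cs 0) r x y := by
  intro r x y
  unfold pvQueryBodyA pvQueryBodyB
  simp only []
  by_cases hlh : max (x - 1) L ≤ min (y - 1) R
  · rw [if_pos hlh]
    have hlo0 : 0 ≤ max (x - 1) L := le_trans hL0 (le_max_right _ _)
    have hhi : min (y - 1) R < (cs.length : Int) := lt_of_le_of_lt (min_le_right _ _) hR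
    rw [countA_aux cs ((min (y - 1) R + 1 - max (x - 1) L).toNat) _ _ _ (le_refl _) hlo0 (by omega)]
    rw [buildPrefix_getD cs 0 (min (y - 1) R + 1).toNat (by omega),
        buildPrefix_getD cs 0 (max (x - 1) L).toNat (by omega)]
    have hsplit : ((cs.take (min (y - 1) R + 1).toNat).count '*' : Int)
        = ((cs.take (max (x - 1) L).toNat).count '*' : Int)
          + (((cs.take (min (y - 1) R + 1).toNat).drop (max (x - 1) L).toNat).count '*' : Int) := by
      have h1 : cs.take (min (y - 1) R + 1).toNat
          = (cs.take (min (y - 1) R + 1).toNat).take (max (x - 1) L).toNat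
            ++ (cs.take (min (y - 1) R + 1).toNat).drop (max (x - 1) L).toNat :=
        (List.take_append_drop _ _).symm
      have h2 : (cs.take (min (y - 1) R + 1).toNat).take (max (x - 1) L).toNat
          = cs.take (max (x - 1) L).toNat := by
        rw [List.take_take]
        congr 1
        omega
      conv_lhs => rw [h1]
      rw [List.count_append, h2]
      push_cast
      ring
    have hc : (0 : Int) + (((cs.take (min (y - 1) R + 1).toNat).drop (max (x - 1) L).toNat).count '*' : Int)
        = (0 + ((cs.take (min (y - 1) R + 1).toNat).count '*' : Int))
          - (0 + ((cs.take (max (x - 1) L).toNat).count '*' : Int)) := by omega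
    rw [hc]
  · rw [if_neg hlh]
    rw [PySem.List.pyRange_one_eq_nil (by omega)]
    simp

-- ===== VERDICT (by name: the statement is the Claim_ definition above) =====
theorem itemsInContainers_spec : Claim_equal_itemsInContainers := by
  unfold Claim_equal_itemsInContainers
  intro s st en _ hpre
  unfold Spec_itemsInContainers itemsInContainers itemsInContainers_alt
  simp only []
  by_cases hlen : s.toList.length < 2
  · rw [if_pos hlen, if_pos hlen]
  · rw [if_neg hlen, if_neg hlen]
    have hfind : PySem.Chars.find s.toList ['|'] = PySem.Chars.find.go ['|'] s.toList 0 := rfl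
    have hL := findLeftA_eq_go s.toList 0
    by_cases hmem : '|' ∈ s.toList
    · -- a pipe exists: both run their query loops
      have hst : st.length ≤ en.length := by
        rcases hpre with h | h | h
        · exact h
        · omega
        · exact absurd hmem h
      have hbound := findgo_bounds s.toList 0
      have hne : PySem.Chars.find.go ['|'] s.toList 0 ≠ -1 := by
        intro hcontr
        have : ¬ (['|'] <:+: s.toList) := by
          rw [← PySem.Chars.find_eq_neg_one_iff]
          rw [hfind.symm] at hcontr
          exact hcontr
        obtain ⟨l1, l2, heq⟩ := List.append_of_mem hmem
        apply this
        rw [heq]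
        exact ⟨l1, l2, by simp⟩
      have hLb : 0 ≤ PySem.Chars.find.go ['|'] s.toList 0 ∧
          PySem.Chars.find.go ['|'] s.toList 0 < (s.toList.length : Int) := by
        rcases hbound with h | h
        · exact absurd h hne
        · push_cast at h; constructor <;> omega
      have hmemrev : '|' ∈ s.toList.reverse := by simpa using hmem
      have hfrev : PySem.Chars.find s.toList.reverse ['|']
          = PySem.Chars.find.go ['|'] s.toList.reverse 0 := rfl
      have hnerev : PySem.Chars.find.go ['|'] s.toList.reverse 0 ≠ -1 := by
        intro hcontr
        have : ¬ (['|'] <:+: s.toList.reverse) := by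
          rw [← PySem.Chars.find_eq_neg_one_iff]
          rw [hfrev.symm] at hcontr
          exact hcontr
        obtain ⟨l1, l2, heq⟩ := List.append_of_mem hmemrev
        apply this
        rw [heq]
        exact ⟨l1, l2, by simp⟩
      have hRb : 0 ≤ PySem.Chars.find.go ['|'] s.toList.reverse 0 ∧
          PySem.Chars.find.go ['|'] s.toList.reverse 0 < (s.toList.length : Int) := by
        rcases findgo_bounds s.toList.reverse 0 with h | h
        · exact absurd h hnerev
        · push_cast at h
          simp only [List.length_reverse] at h
          constructor <;> omega
      have hR := findRightA_eq s.toList hmem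
      rw [hL, hfind.symm] at *
      rw [hR]
      rw [if_neg (by
        simp only [Bool.or_eq_true, beq_iff_eq]
        push_neg
        constructor <;> [skip; rw [hfrev]] <;> omega)]
      rw [if_neg (by simp only [beq_iff_eq]; omega)]
      calc (PySem.List.pyRange 0 (st.length : Int) 1).foldl
            (fun r i => pvQueryBodyA s.toList (PySem.Chars.find s.toList ['|'])
              ((s.toList.length : Int) - 1 - PySem.Chars.find s.toList.reverse ['|']) r
              (PySem.List.pyGetD st i 0) (PySem.List.pyGetD en i 0)) []
          = (st.zip en).foldl (fun r p => pvQueryBodyA s.toList (PySem.Chars.find s.toList ['|'])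
              ((s.toList.length : Int) - 1 - PySem.Chars.find s.toList.reverse ['|']) r p.1 p.2) [] :=
            pyRangeFold_zip _ st en [] hst
        _ = (st.zip en).foldl (fun r p => pvQueryBodyB (PySem.Chars.find s.toList ['|'])
              ((s.toList.length : Int) - 1 - PySem.Chars.find s.toList.reverse ['|'])
              ((0 : Int) :: pvBuildPrefix s.toList 0) r p.1 p.2) [] := by
            apply PySem.List.foldl_congr_mem
            intro acc p _
            exact queryBody_eq s.toList _ _ hLb.1 (by rw [hfrev]; omega) acc p.1 p.2
    · -- no pipe: both return [0]
      have hnone : PySem.Chars.find.go ['|'] s.toList 0 = -1 := by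
        rw [hfind.symm, PySem.Chars.find_eq_neg_one_iff]
        intro hinf
        exact hmem (hinf.subset (by simp))
      rw [hL, hnone]
      rw [hfind, hnone]
      simp
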